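-- pv_equiv track=rewrite | github.com/rzimmerdev/usp-projects | python/algorithms/chessboards/chessboards.py | dfs
-- ===== SOURCE A (Python) =====
-- board_size = 8
--
-- def toggle_place(coord, col, diagonal_l, diagonal_r):
--     col[coord[0]] = not col[coord[0]]
--     diagonal_l[coord[1] - coord[0] + board_size - 1] = not diagonal_l[coord[1] - coord[0] + board_size - 1]
--     diagonal_r[coord[1] + coord[0]] = not diagonal_r[coord[1] + coord[0]]
--
-- def dfs(pos, board, col, diagonal_l, diagonal_r, sequence, total):
--     if pos == board_size:
--         return max(sequence, total)
--
--     for i in range(board_size):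
--         if not col[i] and not diagonal_l[pos - i + board_size - 1] and not diagonal_r[pos + i]:
--
--             toggle_place((i, pos), col, diagonal_l, diagonal_r)
--             sequence = dfs(pos + 1, board, col, diagonal_l, diagonal_r, sequence, total + board[pos][i])
--             toggle_place((i, pos), col, diagonal_l, diagonal_r)
--
--     return sequence
-- ===== SOURCE B (Python) =====
-- board_size = 8
--
-- def dfs(pos, board, col, diagonal_l, diagonal_r, sequence, total):
--     # Explicit stack-based DFS over immutable snapshots instead of
--     # recursive backtracking with in-place toggle/undo.
--     best = sequence
--     stack = [(pos, total, tuple(col), tuple(diagonal_l), tuple(diagonal_r))]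
--     while stack:
--         p, t, c, l, r = stack.pop()
--         if p == board_size:
--             if t > best:
--                 best = t
--             continue
--         for i in range(board_size - 1, -1, -1):
--             if not c[i] and not l[p - i + board_size - 1] and not r[p + i]:
--                 stack.append((p + 1, t + board[p][i],
--                               c[:i] + (True,) + c[i + 1:],
--                               l[:p - i + board_size - 1] + (True,) + l[p - i + board_size:],
--                               r[:p + i] + (True,) + r[p + i + 1:]))
--     return best
-- ===== Notes on version B (the rewrite author's own statement) =====
-- stated objective: alternative
-- what changed: Recursive backtracking that mutates and un-mutates the shared col/diagonal arrays is replaced by an iterative explicit-stack DFS whose frames carry immutable occupancy snapshots, folding the best total with max; Pre_ admits pos = 8 (immediate return) and otherwise restricts to shapes large enough for the 8-queens recursion (0 <= pos <= 8, board at least 8x8, col of length >= 8, diagonals of length >= 15), outside which A raises IndexError or its value depends on Python negative-index wraparound / short-circuit skipping of malformed arrays.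
-- outside the precondition, e.g. on dfs(3, [], [True, True, True, True, True, True, True, True], [], [], 5, 0): A returns 5, B returns 5
import Mathlib
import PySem

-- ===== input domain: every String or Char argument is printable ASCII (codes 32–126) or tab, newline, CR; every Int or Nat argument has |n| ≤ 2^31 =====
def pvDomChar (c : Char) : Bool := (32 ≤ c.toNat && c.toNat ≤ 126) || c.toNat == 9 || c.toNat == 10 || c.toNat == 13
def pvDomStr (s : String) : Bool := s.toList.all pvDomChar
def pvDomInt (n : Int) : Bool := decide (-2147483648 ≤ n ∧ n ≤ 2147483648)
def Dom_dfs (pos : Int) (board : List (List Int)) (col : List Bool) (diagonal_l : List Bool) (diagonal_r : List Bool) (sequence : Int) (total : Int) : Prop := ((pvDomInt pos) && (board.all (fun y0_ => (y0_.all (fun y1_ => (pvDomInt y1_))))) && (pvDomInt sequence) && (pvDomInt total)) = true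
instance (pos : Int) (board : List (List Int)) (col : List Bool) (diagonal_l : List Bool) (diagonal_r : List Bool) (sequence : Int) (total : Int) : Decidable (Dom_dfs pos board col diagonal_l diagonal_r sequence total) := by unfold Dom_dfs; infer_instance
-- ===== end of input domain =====

-- B replaces A's recursive backtracking (in-place toggle/undo of the shared occupancy
-- arrays) by an iterative explicit-stack DFS over immutable occupancy snapshots.
-- A mutates col/diagonal_l/diagonal_r but restores them before returning; the claim
-- here is about the return value.

-- ===== PORT A =====
-- toggle_place: flips the three occupancy cells (pyGetD/pySetD are Python-exact reads/writes)
def togglePlace (coord : Int × Int) (col diagonal_l diagonal_r : List Bool) :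
    List Bool × List Bool × List Bool :=
  (PySem.List.pySetD col coord.1 (!(PySem.List.pyGetD col coord.1 false)),
   PySem.List.pySetD diagonal_l (coord.2 - coord.1 + 8 - 1)
     (!(PySem.List.pyGetD diagonal_l (coord.2 - coord.1 + 8 - 1) false)),
   PySem.List.pySetD diagonal_r (coord.2 + coord.1)
     (!(PySem.List.pyGetD diagonal_r (coord.2 + coord.1) false)))

-- the 'pos < 8' dite is a totality guard only (the measure (8-pos).toNat must decrease);
-- Pre_dfs keeps pos ≤ 8, where it never fires spuriously.
def dfs (pos : Int) (board : List (List Int)) (col : List Bool) (diagonal_l : List Bool) (diagonal_r : List Bool) (sequence : Int) (total : Int) : Int :=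
  if pos = 8 then max sequence total
  else if h : pos < 8 then
    (List.range 8).foldl (fun (seq : Int) (i : Nat) =>
      if !(PySem.List.pyGetD col (i : Int) false)
         && !(PySem.List.pyGetD diagonal_l (pos - (i : Int) + 8 - 1) false)
         && !(PySem.List.pyGetD diagonal_r (pos + (i : Int)) false) then
        dfs (pos + 1) board
          (togglePlace ((i : Int), pos) col diagonal_l diagonal_r).1
          (togglePlace ((i : Int), pos) col diagonal_l diagonal_r).2.1
          (togglePlace ((i : Int), pos) col diagonal_l diagonal_r).2.2
          seq (total + PySem.List.pyGetD (PySem.List.pyGetD board pos []) (i : Int) 0)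
      else seq) sequence
  else sequence
termination_by (8 - pos).toNat
decreasing_by omega

-- ===== PORT B =====
-- a stack frame: (p, t, col snapshot, diagonal_l snapshot, diagonal_r snapshot)
def pvFrameWeight (p : Int) : Nat := 9 ^ ((9 - p).toNat)

def pvStackMeasure (st : List (Int × Int × List Bool × List Bool × List Bool)) : Nat :=
  (st.map (fun f => pvFrameWeight f.1)).sum

-- xs[:k] + (True,) + xs[k+1:]
def pvSplice (xs : List Bool) (k : Int) : List Bool :=
  PySem.List.slice xs none (some k) ++ [true] ++ PySem.List.slice xs (some (k + 1)) none

-- termination helper for the push loop (cited by dfsB_loop's decreasing_by)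
theorem pvStackMeasure_foldl_le (w : Nat)
    (f : List (Int × Int × List Bool × List Bool × List Bool) → Nat →
         List (Int × Int × List Bool × List Bool × List Bool))
    (hf : ∀ st i, pvStackMeasure (f st i) ≤ pvStackMeasure st + w) :
    ∀ (l : List Nat) (rest : List (Int × Int × List Bool × List Bool × List Bool)),
      pvStackMeasure (l.foldl f rest) ≤ pvStackMeasure rest + l.length * w := by
  intro l
  induction l with
  | nil => intro rest; simp
  | cons i l ih =>
    intro rest
    calc pvStackMeasure ((i :: l).foldl f rest) = pvStackMeasure (l.foldl f (f rest i)) := rfl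
      _ ≤ pvStackMeasure (f rest i) + l.length * w := ih (f rest i)
      _ ≤ (pvStackMeasure rest + w) + l.length * w := by have := hf rest i; omega
      _ = pvStackMeasure rest + (i :: l).length * w := by
          simp [List.length_cons, Nat.succ_mul]; ring

theorem pvFrameWeight_pos (p : Int) : 0 < pvFrameWeight p := by
  unfold pvFrameWeight; positivity

theorem pvFrameWeight_succ (p : Int) (h : p < 8) :
    pvFrameWeight p = 9 * pvFrameWeight (p + 1) := by
  unfold pvFrameWeight
  have h1 : (9 - p).toNat = (9 - (p + 1)).toNat + 1 := by omega
  rw [h1, pow_succ]; ring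

def dfsB_loop (board : List (List Int))
    (stack : List (Int × Int × List Bool × List Bool × List Bool)) (best : Int) : Int :=
  match stack with
  | [] => best
  | (p, t, c, l, r) :: rest =>
    if p = 8 then dfsB_loop board rest (if t > best then t else best)
    else if h : p < 8 then
      -- for i in range(7, -1, -1): push the valid children (top of stack = list head)
      dfsB_loop board
        (((List.range 8).reverse).foldl (fun st (i : Nat) =>
          if !(PySem.List.pyGetD c (i : Int) false)
             && !(PySem.List.pyGetD l (p - (i : Int) + 8 - 1) false)
             && !(PySem.List.pyGetD r (p + (i : Int)) false) then
            (p + 1, t + PySem.List.pyGetD (PySem.List.pyGetD board p []) (i : Int) 0,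
             pvSplice c (i : Int), pvSplice l (p - (i : Int) + 8 - 1),
             pvSplice r (p + (i : Int))) :: st
          else st) rest) best
    else dfsB_loop board rest best  -- totality guard; Pre_dfs keeps every frame at p ≤ 8
termination_by pvStackMeasure stack
decreasing_by
  · have h0 := pvFrameWeight_pos p
    simp only [pvStackMeasure, List.map_cons, List.sum_cons]
    omega
  · refine lt_of_le_of_lt
      (pvStackMeasure_foldl_le (pvFrameWeight (p + 1)) _ ?_ ((List.range 8).reverse) rest) ?_
    · intro st i
      split
      · simp only [pvStackMeasure, List.map_cons, List.sum_cons]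
        omega
      · omega
    · have hw := pvFrameWeight_succ p h
      have hp0 := pvFrameWeight_pos (p + 1)
      simp only [List.length_reverse, List.length_range, pvStackMeasure, List.map_cons,
        List.sum_cons]
      omega
  · have h0 := pvFrameWeight_pos p
    simp only [pvStackMeasure, List.map_cons, List.sum_cons]
    omega

def dfs_alt (pos : Int) (board : List (List Int)) (col : List Bool) (diagonal_l : List Bool) (diagonal_r : List Bool) (sequence : Int) (total : Int) : Int :=
  dfsB_loop board [(pos, total, col, diagonal_l, diagonal_r)] sequence

-- ===== PRECONDITION & SPEC =====
-- Pre_dfs admits the immediate-return case pos = 8 (any shapes) and otherwise restricts to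
-- shapes large enough for the 8-queens recursion; outside them Python A raises IndexError or returns a value
-- depending on negative-index wraparound / short-circuit skipping of malformed arrays,
-- which is accidental.
def Pre_dfs (pos : Int) (board : List (List Int)) (col : List Bool) (diagonal_l : List Bool) (diagonal_r : List Bool) (sequence : Int) (total : Int) : Prop :=
  pos = 8 ∨
  (0 ≤ pos ∧ pos ≤ 8 ∧ 8 ≤ board.length ∧ (∀ row ∈ board, 8 ≤ row.length) ∧
   8 ≤ col.length ∧ 15 ≤ diagonal_l.length ∧ 15 ≤ diagonal_r.length)
instance (pos : Int) (board : List (List Int)) (col : List Bool) (diagonal_l : List Bool) (diagonal_r : List Bool) (sequence : Int) (total : Int) : Decidable (Pre_dfs pos board col diagonal_l diagonal_r sequence total) := by unfold Pre_dfs; infer_instance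

def pvWitness_dfs : Int × List (List Int) × List Bool × List Bool × List Bool × Int × Int :=
  (8, List.replicate 8 (List.replicate 8 (0 : Int)), List.replicate 8 false,
   List.replicate 15 false, List.replicate 15 false, 3, 5)

def Spec_dfs (pos : Int) (board : List (List Int)) (col : List Bool) (diagonal_l : List Bool) (diagonal_r : List Bool) (sequence : Int) (total : Int) (out : Int) : Prop := out = dfs_alt pos board col diagonal_l diagonal_r sequence total
instance (pos : Int) (board : List (List Int)) (col : List Bool) (diagonal_l : List Bool) (diagonal_r : List Bool) (sequence : Int) (total : Int) (out : Int) : Decidable (Spec_dfs pos board col diagonal_l diagonal_r sequence total out) := by unfold Spec_dfs; infer_instance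

-- ===== CLAIM (what is proved, stated in full; the proofs are below) =====
def Claim_equal_dfs : Prop := ∀ (pos : Int) (board : List (List Int)) (col : List Bool) (diagonal_l : List Bool) (diagonal_r : List Bool) (sequence : Int) (total : Int), Dom_dfs pos board col diagonal_l diagonal_r sequence total → Pre_dfs pos board col diagonal_l diagonal_r sequence total → Spec_dfs pos board col diagonal_l diagonal_r sequence total (dfs pos board col diagonal_l diagonal_r sequence total)

-- ===== LEMMAS AND PROOFS =====

-- under the guard 'cell is free', A's toggle write equals B's slice splice
theorem splice_eq (xs : List Bool) (k : Int) (h0 : 0 ≤ k) (hk : k.toNat < xs.length)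
    (hf : PySem.List.pyGetD xs k false = false) :
    PySem.List.pySetD xs k (!(PySem.List.pyGetD xs k false)) = pvSplice xs k := by
  rw [hf]
  rw [PySem.List.pySetD_of_nonneg _ _ h0]
  unfold pvSplice
  rw [PySem.List.slice_to _ h0, PySem.List.slice_from _ (by omega : (0:Int) ≤ k + 1)]
  rw [List.set_eq_take_cons_drop _ hk]
  have h1 : (k + 1).toNat = k.toNat + 1 := by omega
  rw [h1]
  simp

theorem length_pvSplice (xs : List Bool) (k : Int) (h0 : 0 ≤ k) (hk : k.toNat < xs.length) :
    (pvSplice xs k).length = xs.length := by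
  unfold pvSplice
  rw [PySem.List.slice_to _ h0, PySem.List.slice_from _ (by omega : (0:Int) ≤ k + 1)]
  simp only [List.length_append, List.length_take, List.length_drop, List.length_cons,
    List.length_nil]
  omega

theorem push_loop_lemma (board : List (List Int)) (p : Int) (c l r : List Bool) (t : Int)
    (h0 : 0 ≤ p) (hp8 : p < 8) (hc : 8 ≤ c.length) (hl : 15 ≤ l.length) (hr : 15 ≤ r.length)
    (IH : ∀ (c2 l2 r2 : List Bool) (t2 best2 : Int)
        (rest2 : List (Int × Int × List Bool × List Bool × List Bool)),
        8 ≤ c2.length → 15 ≤ l2.length → 15 ≤ r2.length →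
        dfsB_loop board ((p + 1, t2, c2, l2, r2) :: rest2) best2
          = dfsB_loop board rest2 (dfs (p + 1) board c2 l2 r2 best2 t2)) :
    ∀ (is : List Nat), (∀ i ∈ is, i < 8) →
      ∀ (rest : List (Int × Int × List Bool × List Bool × List Bool)) (best : Int),
      dfsB_loop board
        (is.foldr (fun (i : Nat) st =>
          if !(PySem.List.pyGetD c (i : Int) false)
             && !(PySem.List.pyGetD l (p - (i : Int) + 8 - 1) false)
             && !(PySem.List.pyGetD r (p + (i : Int)) false) then
            (p + 1, t + PySem.List.pyGetD (PySem.List.pyGetD board p []) (i : Int) 0,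
             pvSplice c (i : Int), pvSplice l (p - (i : Int) + 8 - 1),
             pvSplice r (p + (i : Int))) :: st
          else st) rest) best
      = dfsB_loop board rest
          (is.foldl (fun (seq : Int) (i : Nat) =>
            if !(PySem.List.pyGetD c (i : Int) false)
               && !(PySem.List.pyGetD l (p - (i : Int) + 8 - 1) false)
               && !(PySem.List.pyGetD r (p + (i : Int)) false) then
              dfs (p + 1) board
                (togglePlace ((i : Int), p) c l r).1
                (togglePlace ((i : Int), p) c l r).2.1
                (togglePlace ((i : Int), p) c l r).2.2
                seq (t + PySem.List.pyGetD (PySem.List.pyGetD board p []) (i : Int) 0)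
            else seq) best) := by
  intro is
  induction is with
  | nil => intro _ rest best; rfl
  | cons i is ihis =>
    intro hmem rest best
    have hi : i < 8 := hmem i (by simp)
    simp only [List.foldr_cons, List.foldl_cons]
    by_cases hcnd : (!(PySem.List.pyGetD c (i : Int) false)
             && !(PySem.List.pyGetD l (p - (i : Int) + 8 - 1) false)
             && !(PySem.List.pyGetD r (p + (i : Int)) false)) = true
    · rw [if_pos hcnd, if_pos hcnd]
      have hfacts := hcnd
      simp only [Bool.and_eq_true, Bool.not_eq_true'] at hfacts
      obtain ⟨⟨hfc, hfl⟩, hfr⟩ := hfacts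
      have hkc : ((i : Int)).toNat < c.length := by omega
      have hkl : ((p - (i : Int) + 8 - 1)).toNat < l.length := by omega
      have hkr : ((p + (i : Int))).toNat < r.length := by omega
      have h0c : (0:Int) ≤ (i : Int) := by omega
      have h0l : (0:Int) ≤ p - (i : Int) + 8 - 1 := by omega
      have h0r : (0:Int) ≤ p + (i : Int) := by omega
      rw [IH _ _ _ _ best _
        (by rw [length_pvSplice c _ h0c hkc]; exact hc)
        (by rw [length_pvSplice l _ h0l hkl]; exact hl)
        (by rw [length_pvSplice r _ h0r hkr]; exact hr)]
      rw [ihis (fun j hj => hmem j (by simp [hj]))]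
      have e1 : (togglePlace ((i : Int), p) c l r).1 = pvSplice c (i : Int) :=
        splice_eq c _ h0c hkc hfc
      have e2 : (togglePlace ((i : Int), p) c l r).2.1 = pvSplice l (p - (i : Int) + 8 - 1) :=
        splice_eq l _ h0l hkl hfl
      have e3 : (togglePlace ((i : Int), p) c l r).2.2 = pvSplice r (p + (i : Int)) :=
        splice_eq r _ h0r hkr hfr
      rw [e1, e2, e3]
    · rw [if_neg hcnd, if_neg hcnd]
      exact ihis (fun j hj => hmem j (by simp [hj])) rest best

theorem frame_lemma (board : List (List Int)) :
    ∀ (n : Nat) (p : Int) (c l r : List Bool) (t best : Int)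
      (rest : List (Int × Int × List Bool × List Bool × List Bool)),
      (8 - p).toNat = n → 0 ≤ p → p ≤ 8 →
      8 ≤ c.length → 15 ≤ l.length → 15 ≤ r.length →
      dfsB_loop board ((p, t, c, l, r) :: rest) best
        = dfsB_loop board rest (dfs p board c l r best t) := by
  intro n
  induction n with
  | zero =>
    intro p c l r t best rest hn h0 h8 hc hl hr
    have hp : p = 8 := by omega
    subst hp
    rw [dfsB_loop]
    rw [if_pos rfl]
    conv_rhs => rw [dfs]
    rw [if_pos rfl]
    congr 1
    rcases lt_or_ge best t with h | h
    · rw [if_pos h, max_eq_right h.le]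
    · rw [if_neg (not_lt.mpr h), max_eq_left h]
  | succ n ihn =>
    intro p c l r t best rest hn h0 h8 hc hl hr
    have hp8 : p < 8 := by omega
    have hne : ¬(p = 8) := by omega
    rw [dfsB_loop]
    rw [if_neg hne, dif_pos hp8]
    rw [List.foldl_reverse]
    conv_rhs => rw [dfs]
    rw [if_neg hne, dif_pos hp8]
    exact push_loop_lemma board p c l r t h0 hp8 hc hl hr
      (fun c2 l2 r2 t2 best2 rest2 hc2 hl2 hr2 =>
        ihn (p + 1) c2 l2 r2 t2 best2 rest2 (by omega) (by omega) (by omega) hc2 hl2 hr2)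
      (List.range 8) (fun i hi => List.mem_range.mp hi) rest best

theorem pvWitness_ok :
    Dom_dfs pvWitness_dfs.1 pvWitness_dfs.2.1 pvWitness_dfs.2.2.1 pvWitness_dfs.2.2.2.1
      pvWitness_dfs.2.2.2.2.1 pvWitness_dfs.2.2.2.2.2.1 pvWitness_dfs.2.2.2.2.2.2 ∧
    Pre_dfs pvWitness_dfs.1 pvWitness_dfs.2.1 pvWitness_dfs.2.2.1 pvWitness_dfs.2.2.2.1
      pvWitness_dfs.2.2.2.2.1 pvWitness_dfs.2.2.2.2.2.1 pvWitness_dfs.2.2.2.2.2.2 := by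
  decide

-- ===== VERDICT (by name: the statement is the Claim_ definition above) =====
theorem dfs_spec : Claim_equal_dfs := by
  intro pos board col dl dr sequence total _ hpre
  unfold Spec_dfs dfs_alt
  rcases hpre with h8 | ⟨h0, h8, _, _, hc, hl, hr⟩
  · subst h8
    rw [dfsB_loop, if_pos rfl, dfsB_loop, dfs, if_pos rfl]
    rcases lt_or_ge sequence total with h | h
    · rw [if_pos h, max_eq_right h.le]
    · rw [if_neg (not_lt.mpr h), max_eq_left h]
  · rw [frame_lemma board (8 - pos).toNat pos col dl dr total sequence [] rfl h0 h8 hc hl hr]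
    rw [dfsB_loop]
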